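-- pv_equiv track=rewrite | github.com/ianm24/cryptography-library | cryptography.py | check_text_in_alphabet
-- ===== SOURCE A (Python) =====
-- LATIN_IGNORED_CHARACTERS = " `~1234567890!@#$%^&*()-_=+[]{}\\|;:'\",<.>/?"
--
-- def check_text_in_alphabet(text, alphabet):
--     """Verifies that all letters in the text are in the alphabet"""
--
--     # Make dictionary of alphabet
--     lookup = {}
--     for letter in alphabet:
--         lookup[letter] = 1
--
--     for letter in text:
--         if letter in LATIN_IGNORED_CHARACTERS:
--             continue
--         check_letter = letter.upper()
--         if check_letter not in lookup:
--             return False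
--
--     return True
-- ===== SOURCE B (Python) =====
-- LATIN_IGNORED_CHARACTERS = " `~1234567890!@#$%^&*()-_=+[]{}\\|;:'\",<.>/?"
--
-- def check_text_in_alphabet(text, alphabet):
--     """Verifies that all letters in the text are in the alphabet"""
--     # Sort-merge subset test: sort the distinct needed letters and the distinct
--     # alphabet letters, then walk both sorted lists with two pointers.
--     needed = sorted({c.upper() for c in text if c not in LATIN_IGNORED_CHARACTERS})
--     alpha = sorted(set(alphabet))
--     i = 0
--     for ch in needed:
--         while i < len(alpha) and alpha[i] < ch:
--             i += 1
--         if i == len(alpha) or alpha[i] != ch: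
--             return False
--         i += 1
--     return True
-- ===== Notes on version B (the rewrite author's own statement) =====
-- stated objective: alternative
-- what changed: Replaces the hash-dict build plus per-character membership scan by a sort-merge subset test: sort the distinct needed uppercased letters and the distinct alphabet letters, then walk both sorted lists with two pointers.
import Mathlib
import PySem

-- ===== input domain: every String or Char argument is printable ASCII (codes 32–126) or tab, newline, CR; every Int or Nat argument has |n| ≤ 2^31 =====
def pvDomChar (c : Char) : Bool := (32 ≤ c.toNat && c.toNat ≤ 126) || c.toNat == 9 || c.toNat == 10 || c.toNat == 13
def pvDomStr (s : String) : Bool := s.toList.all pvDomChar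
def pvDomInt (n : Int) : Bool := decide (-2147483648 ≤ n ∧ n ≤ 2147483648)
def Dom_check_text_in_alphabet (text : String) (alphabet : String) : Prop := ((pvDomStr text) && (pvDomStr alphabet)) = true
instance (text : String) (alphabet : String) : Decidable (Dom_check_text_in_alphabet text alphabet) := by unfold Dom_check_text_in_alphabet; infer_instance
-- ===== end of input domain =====

-- B replaces the hash-dict scan by a sort-merge subset test (sorted distinct needed letters vs sorted distinct alphabet letters, two pointers); same result, different algorithm.

def latinIgnoredChars : List Char := " `~1234567890!@#$%^&*()-_=+[]{}\\|;:'\",<.>/?".toList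

-- ===== PORT A =====
-- for letter in text: skip ignored, early-return False when letter.upper() not in lookup
def pvALoop (lookup : PySem.Dict Char Int) : List Char → Bool
  | [] => true
  | letter :: rest =>
    if latinIgnoredChars.contains letter then pvALoop lookup rest
    else
      let check_letter := PySem.Chars.upperChar letter
      if !(lookup.contains check_letter) then false
      else pvALoop lookup rest

def check_text_in_alphabet (text : String) (alphabet : String) : Bool :=
  -- lookup = {}; for letter in alphabet: lookup[letter] = 1
  let lookup := alphabet.toList.foldl (fun d letter => d.insert letter (1 : Int)) PySem.Dict.empty
  pvALoop lookup text.toList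

-- ===== PORT B =====
-- the two-pointer walk: 'for ch in needed: advance i past smaller alpha letters; fail on mismatch'
def pvBMerge : List Char → List Char → Bool
  | [], _ => true
  | _ :: _, [] => false
  | ch :: rest, a :: as =>
    if a < ch then pvBMerge (ch :: rest) as
    else if a = ch then pvBMerge rest as
    else false
termination_by xs ys => xs.length + ys.length

def check_text_in_alphabet_alt (text : String) (alphabet : String) : Bool :=
  -- needed = sorted({c.upper() for c in text if c not in LATIN_IGNORED_CHARACTERS})
  let needed := PySem.List.sorted
    (PySem.Set.ofList ((text.toList.filter (fun c => !latinIgnoredChars.contains c)).map PySem.Chars.upperChar))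
    (fun x => x) false
  -- alpha = sorted(set(alphabet))
  let alpha := PySem.List.sorted (PySem.Set.ofList alphabet.toList) (fun x => x) false
  pvBMerge needed alpha

-- ===== PRECONDITION & SPEC =====
def Spec_check_text_in_alphabet (text : String) (alphabet : String) (out : Bool) : Prop := out = check_text_in_alphabet_alt text alphabet
instance (text : String) (alphabet : String) (out : Bool) : Decidable (Spec_check_text_in_alphabet text alphabet out) := by unfold Spec_check_text_in_alphabet; infer_instance

-- ===== CLAIM (what is proved, stated in full; the proofs are below) =====
def Claim_equal_check_text_in_alphabet : Prop := ∀ (text : String) (alphabet : String), Dom_check_text_in_alphabet text alphabet → Spec_check_text_in_alphabet text alphabet (check_text_in_alphabet text alphabet)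

-- ===== LEMMAS AND PROOFS =====

theorem pvALoop_eq_all (lookup : PySem.Dict Char Int) (cs : List Char) :
    pvALoop lookup cs
      = cs.all (fun c => latinIgnoredChars.contains c || lookup.contains (PySem.Chars.upperChar c)) := by
  induction cs with
  | nil => rfl
  | cons c rest ih =>
    simp only [pvALoop, List.all_cons, ih]
    by_cases h : c ∈ latinIgnoredChars <;> simp [h]

theorem contains_build (l : List Char) (d : PySem.Dict Char Int) (x : Char) :
    (l.foldl (fun d letter => d.insert letter (1 : Int)) d).contains x
      = (d.contains x || l.contains x) := by
  induction l generalizing d with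
  | nil => simp
  | cons c rest ih =>
    simp [List.foldl_cons, ih, PySem.Dict.contains_insert]
    by_cases h : x = c
    · simp [h]
    · have hb : (x == c) = false := by simp [h]
      simp [hb, h]

-- on strictly sorted lists the two-pointer walk decides subset membership
theorem pvBMerge_iff (ys : List Char) : ∀ xs : List Char,
    xs.Pairwise (· < ·) → ys.Pairwise (· < ·) →
    (pvBMerge xs ys = true ↔ ∀ x ∈ xs, x ∈ ys) := by
  induction ys with
  | nil =>
    intro xs _ _
    cases xs with
    | nil => simp [pvBMerge]
    | cons c cs =>
      simp [pvBMerge]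
      exact ⟨c, fun h => absurd rfl h⟩
  | cons a as ih =>
    intro xs hxs hys
    cases xs with
    | nil => simp [pvBMerge]
    | cons ch rest =>
      have hys' : as.Pairwise (· < ·) := hys.tail
      have ha : ∀ y ∈ as, a < y := by
        intro y hy; exact List.rel_of_pairwise_cons hys hy
      by_cases h1 : a < ch
      · rw [show pvBMerge (ch :: rest) (a :: as) = pvBMerge (ch :: rest) as by
          simp [pvBMerge, h1]]
        rw [ih (ch :: rest) hxs hys']
        constructor
        · intro h x hx; exact List.mem_cons_of_mem a (h x hx)
        · intro h x hx
          have hx' := h x hx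
          rcases List.mem_cons.mp hx' with rfl | hmem
          · exfalso
            rcases List.mem_cons.mp hx with rfl | hr
            · exact lt_irrefl _ h1
            · exact lt_irrefl _ (h1.trans (List.rel_of_pairwise_cons hxs hr))
          · exact hmem
      · by_cases h2 : a = ch
        · subst h2
          rw [show pvBMerge (a :: rest) (a :: as) = pvBMerge rest as by
            rw [pvBMerge]; simp]
          rw [ih rest hxs.tail hys']
          constructor
          · intro h x hx
            rcases List.mem_cons.mp hx with rfl | hr
            · exact List.mem_cons_self
            · exact List.mem_cons_of_mem a (h x hr)
          · intro h x hx
            have hx' := h x (List.mem_cons_of_mem a hx)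
            rcases List.mem_cons.mp hx' with rfl | hmem
            · exact absurd (List.rel_of_pairwise_cons hxs hx) (lt_irrefl x)
            · exact hmem
        · rw [show pvBMerge (ch :: rest) (a :: as) = false by
            simp [pvBMerge, h1, h2]]
          have hlt : ch < a := lt_of_le_of_ne (not_lt.mp h1) (fun h => h2 h.symm)
          simp only [Bool.false_eq_true, false_iff]
          intro h
          have := h ch List.mem_cons_self
          rcases List.mem_cons.mp this with rfl | hmem
          · exact lt_irrefl _ hlt
          · exact lt_irrefl _ (hlt.trans (ha ch hmem))

-- ===== VERDICT (by name: the statement is the Claim_ definition above) =====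
theorem check_text_in_alphabet_spec : Claim_equal_check_text_in_alphabet := by
  intro text alphabet _
  unfold Spec_check_text_in_alphabet check_text_in_alphabet check_text_in_alphabet_alt
  simp only [pvALoop_eq_all, contains_build]
  rw [Bool.eq_iff_iff]
  rw [pvBMerge_iff _ _ (PySem.List.sorted_ofList_pairwise_lt _) (PySem.List.sorted_ofList_pairwise_lt _)]
  simp only [List.all_eq_true, PySem.List.mem_sorted, PySem.Set.mem_ofList, List.mem_map,
    List.mem_filter]
  constructor
  · rintro h x ⟨c, ⟨hc, hnc⟩, rfl⟩
    have := h c hc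
    simp at this hnc
    rcases this with h1 | h1
    · exact absurd h1 hnc
    · simpa using h1
  · intro h c hc
    by_cases hig : c ∈ latinIgnoredChars
    · simp [hig]
    · have := h (PySem.Chars.upperChar c) ⟨c, ⟨hc, by simp [hig]⟩, rfl⟩
      simp [hig]
      simpa using this
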